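-- pv_equiv track=rewrite | github.com/dcille/ARCA | scanner/registry/cross_references.py | _guess_provider
-- ===== SOURCE A (Python) =====
-- def _guess_provider(check_id: str) -> str:
--     """Guess provider from check_id prefix."""
--     prefixes = {
--         "aws_": "aws", "azure_": "azure", "gcp_": "gcp",
--         "oci_": "oci", "alibaba_": "alibaba", "ibm_": "ibm_cloud",
--         "k8s_": "kubernetes", "m365_": "m365", "github_": "github",
--         "gws_": "google_workspace", "sf_": "salesforce",
--         "snow_": "snowflake", "cf_": "cloudflare",
--     }
--     for prefix, provider in prefixes.items():
--         if check_id.startswith(prefix):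
--             return provider
--     # Many AWS checks don't have prefix
--     return "aws_or_unknown"
-- ===== SOURCE B (Python) =====
-- def _guess_provider(check_id: str) -> str:
--     """Guess provider from check_id prefix."""
--     mapping = {
--         "aws": "aws", "azure": "azure", "gcp": "gcp", "oci": "oci",
--         "alibaba": "alibaba", "ibm": "ibm_cloud", "k8s": "kubernetes",
--         "m365": "m365", "github": "github", "gws": "google_workspace",
--         "sf": "salesforce", "snow": "snowflake", "cf": "cloudflare",
--     }
--     head, sep, _ = check_id.partition("_")
--     return mapping.get(head, "aws_or_unknown") if sep else "aws_or_unknown"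
-- ===== Notes on version B (the rewrite author's own statement) =====
-- stated objective: idiomatic
-- what changed: Replaces the loop over prefix->provider pairs with per-item startswith tests by a single str.partition that extracts the bare leading token, followed by one dict .get lookup keyed by that token.
import Mathlib
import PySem

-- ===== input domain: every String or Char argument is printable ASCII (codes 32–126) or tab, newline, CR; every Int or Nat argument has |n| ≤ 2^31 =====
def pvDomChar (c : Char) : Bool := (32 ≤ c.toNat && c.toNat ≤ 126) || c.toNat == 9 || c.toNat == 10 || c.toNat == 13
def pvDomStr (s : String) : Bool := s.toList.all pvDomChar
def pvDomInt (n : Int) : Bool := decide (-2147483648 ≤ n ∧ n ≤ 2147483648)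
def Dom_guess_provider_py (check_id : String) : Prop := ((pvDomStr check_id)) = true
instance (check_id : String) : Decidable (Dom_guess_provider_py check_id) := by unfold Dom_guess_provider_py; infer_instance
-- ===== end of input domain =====

-- B replaces A's loop of per-prefix startswith tests by str.partition on the underscore plus one
-- dict lookup on the bare leading token (objective: idiomatic; no speed claim).


-- ===== PORT A =====
def guess_provider_py (check_id : String) : String :=
  if PySem.Str.startswith check_id "aws_" then "aws"
  else if PySem.Str.startswith check_id "azure_" then "azure"
  else if PySem.Str.startswith check_id "gcp_" then "gcp"
  else if PySem.Str.startswith check_id "oci_" then "oci"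
  else if PySem.Str.startswith check_id "alibaba_" then "alibaba"
  else if PySem.Str.startswith check_id "ibm_" then "ibm_cloud"
  else if PySem.Str.startswith check_id "k8s_" then "kubernetes"
  else if PySem.Str.startswith check_id "m365_" then "m365"
  else if PySem.Str.startswith check_id "github_" then "github"
  else if PySem.Str.startswith check_id "gws_" then "google_workspace"
  else if PySem.Str.startswith check_id "sf_" then "salesforce"
  else if PySem.Str.startswith check_id "snow_" then "snowflake"
  else if PySem.Str.startswith check_id "cf_" then "cloudflare"
  else "aws_or_unknown"

-- ===== PORT B =====
def pvMapping : PySem.Dict String String :=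
  PySem.Dict.ofList [("aws", "aws"), ("azure", "azure"), ("gcp", "gcp"), ("oci", "oci"),
    ("alibaba", "alibaba"), ("ibm", "ibm_cloud"), ("k8s", "kubernetes"),
    ("m365", "m365"), ("github", "github"), ("gws", "google_workspace"),
    ("sf", "salesforce"), ("snow", "snowflake"), ("cf", "cloudflare")]

-- str.partition on the underscore, ported by hand (PySem has no partition; exact on all inputs):
-- head = characters before the first underscore, sep nonempty iff an underscore occurs.
def guess_provider_py_alt (check_id : String) : String :=
  let head := String.ofList (check_id.toList.takeWhile (· != '_'))
  let sep : Bool := check_id.toList.contains '_'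
  if sep then pvMapping.getD head "aws_or_unknown" else "aws_or_unknown"

-- ===== PRECONDITION & SPEC =====
def Spec_guess_provider_py (check_id : String) (out : String) : Prop := out = guess_provider_py_alt check_id
instance (check_id : String) (out : String) : Decidable (Spec_guess_provider_py check_id out) := by unfold Spec_guess_provider_py; infer_instance

-- ===== CLAIM (what is proved, stated in full; the proofs are below) =====
def Claim_equal_guess_provider_py : Prop := ∀ (check_id : String), Dom_guess_provider_py check_id → Spec_guess_provider_py check_id (guess_provider_py check_id)

-- ===== LEMMAS AND PROOFS =====

lemma pv_prefix_iff (l : List Char) : ∀ (k : List Char), '_' ∉ k →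
    ((k ++ ['_']) <+: l ↔ ('_' ∈ l ∧ l.takeWhile (· != '_') = k)) := by
  induction l with
  | nil =>
    intro k _
    simp [List.prefix_nil]
  | cons c t ih =>
    intro k hk
    cases k with
    | nil =>
      by_cases hc : c = '_'
      · simp [hc, List.cons_prefix_cons]
      · simp [hc, List.cons_prefix_cons, Ne.symm hc]
    | cons a k' =>
      have ha : a ≠ '_' := fun h => hk (h ▸ List.mem_cons_self ..)
      have hk' : '_' ∉ k' := fun h => hk (List.mem_cons_of_mem _ h)
      by_cases hc : c = a
      · subst hc
        have := ih k' hk'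
        simp [List.cons_prefix_cons, ha, this, bne]
        tauto
      · by_cases hcu : c = '_'
        · subst hcu
          simp [List.cons_prefix_cons, ha]
        · simp [List.cons_prefix_cons, hc, hcu, bne, Ne.symm hc]

lemma pv_sw_false (s p : String) (hp : '_' ∈ p.toList) (hm : '_' ∉ s.toList) :
    PySem.Str.startswith s p = false := by
  rw [← Bool.not_eq_true]
  intro h
  have h2 : PySem.Chars.startswith s.toList p.toList = true := by simpa using h
  exact hm (((PySem.Chars.startswith_iff _ _).mp h2).subset hp)

lemma pv_sw_iff (s p : String) (k : List Char) (hsplit : p.toList = k ++ ['\u005f'])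
    (hk : '_' ∉ k) (hm : '_' ∈ s.toList) :
    PySem.Str.startswith s p = (s.toList.takeWhile (· != '_') == k) := by
  have e : PySem.Str.startswith s p = PySem.Chars.startswith s.toList p.toList := by simp
  rw [e]
  have h := pv_prefix_iff s.toList k hk
  by_cases hpre : (k ++ ['_']) <+: s.toList
  · have h1 : PySem.Chars.startswith s.toList p.toList = true := by
      rw [PySem.Chars.startswith_iff, hsplit]; exact hpre
    rw [h1, (h.mp hpre).2]
    simp
  · have ht : s.toList.takeWhile (· != '_') ≠ k := fun he => hpre (h.mpr ⟨hm, he⟩)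
    have h1 : PySem.Chars.startswith s.toList p.toList = false := by
      rw [← Bool.not_eq_true]
      intro hh
      exact hpre (hsplit ▸ (PySem.Chars.startswith_iff _ _).mp hh)
    rw [h1]
    simp [ht]

lemma pv_mk_eq (t : List Char) (s : String) : (s = String.ofList t) ↔ (t = s.toList) := by
  constructor
  · intro h; simp [h]
  · intro h; simp [h]

theorem guess_provider_py_spec : Claim_equal_guess_provider_py := by
  intro check_id _
  unfold Spec_guess_provider_py guess_provider_py guess_provider_py_alt
  by_cases hm : '_' ∈ check_id.toList
  · rw [pv_sw_iff check_id "aws_" "aws".toList (by decide) (by decide) hm,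
        pv_sw_iff check_id "azure_" "azure".toList (by decide) (by decide) hm,
        pv_sw_iff check_id "gcp_" "gcp".toList (by decide) (by decide) hm,
        pv_sw_iff check_id "oci_" "oci".toList (by decide) (by decide) hm,
        pv_sw_iff check_id "alibaba_" "alibaba".toList (by decide) (by decide) hm,
        pv_sw_iff check_id "ibm_" "ibm".toList (by decide) (by decide) hm,
        pv_sw_iff check_id "k8s_" "k8s".toList (by decide) (by decide) hm,
        pv_sw_iff check_id "m365_" "m365".toList (by decide) (by decide) hm,
        pv_sw_iff check_id "github_" "github".toList (by decide) (by decide) hm,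
        pv_sw_iff check_id "gws_" "gws".toList (by decide) (by decide) hm,
        pv_sw_iff check_id "sf_" "sf".toList (by decide) (by decide) hm,
        pv_sw_iff check_id "snow_" "snow".toList (by decide) (by decide) hm,
        pv_sw_iff check_id "cf_" "cf".toList (by decide) (by decide) hm]
    have hc : check_id.toList.contains '_' = true := by simpa using hm
    have hmap : pvMapping = PySem.Dict.mk [("aws", "aws"), ("azure", "azure"), ("gcp", "gcp"),
        ("oci", "oci"), ("alibaba", "alibaba"), ("ibm", "ibm_cloud"), ("k8s", "kubernetes"),
        ("m365", "m365"), ("github", "github"), ("gws", "google_workspace"),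
        ("sf", "salesforce"), ("snow", "snowflake"), ("cf", "cloudflare")] := rfl
    simp only [hc, if_true]
    set t := check_id.toList.takeWhile (· != '_') with htdef
    by_cases h1 : t = ['a', 'w', 's']
    · rw [h1]; decide
    by_cases h2 : t = ['a', 'z', 'u', 'r', 'e']
    · rw [h2]; decide
    by_cases h3 : t = ['g', 'c', 'p']
    · rw [h3]; decide
    by_cases h4 : t = ['o', 'c', 'i']
    · rw [h4]; decide
    by_cases h5 : t = ['a', 'l', 'i', 'b', 'a', 'b', 'a']
    · rw [h5]; decide
    by_cases h6 : t = ['i', 'b', 'm']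
    · rw [h6]; decide
    by_cases h7 : t = ['k', '8', 's']
    · rw [h7]; decide
    by_cases h8 : t = ['m', '3', '6', '5']
    · rw [h8]; decide
    by_cases h9 : t = ['g', 'i', 't', 'h', 'u', 'b']
    · rw [h9]; decide
    by_cases h10 : t = ['g', 'w', 's']
    · rw [h10]; decide
    by_cases h11 : t = ['s', 'f']
    · rw [h11]; decide
    by_cases h12 : t = ['s', 'n', 'o', 'w']
    · rw [h12]; decide
    by_cases h13 : t = ['c', 'f']
    · rw [h13]; decide
    simp [hmap, PySem.Dict.getD, PySem.Dict.get?, pv_mk_eq, h1, h2, h3, h4, h5, h6, h7, h8, h9, h10, h11, h12, h13]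
  · have hc : check_id.toList.contains '_' = false := by simpa using hm
    rw [pv_sw_false check_id "aws_" (by decide) hm,
        pv_sw_false check_id "azure_" (by decide) hm,
        pv_sw_false check_id "gcp_" (by decide) hm,
        pv_sw_false check_id "oci_" (by decide) hm,
        pv_sw_false check_id "alibaba_" (by decide) hm,
        pv_sw_false check_id "ibm_" (by decide) hm,
        pv_sw_false check_id "k8s_" (by decide) hm,
        pv_sw_false check_id "m365_" (by decide) hm,
        pv_sw_false check_id "github_" (by decide) hm,
        pv_sw_false check_id "gws_" (by decide) hm,
        pv_sw_false check_id "sf_" (by decide) hm,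
        pv_sw_false check_id "snow_" (by decide) hm,
        pv_sw_false check_id "cf_" (by decide) hm, hc]
    simp
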